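-- pv_equiv track=rewrite | github.com/amandineslx/adventofcode2024 | 01/01.py | compute_similarities
-- ===== SOURCE A (Python) =====
-- def compute_similarities(list_left, compressed_list_right):
--     similarity = 0
--     for x in list_left:
--         if x in compressed_list_right.keys():
--             similarity += x*compressed_list_right[x]
--         else:
--             continue
--     return similarity
-- ===== SOURCE B (Python) =====
-- def compute_similarities(list_left, compressed_list_right):
--     left_count = {}
--     for x in list_left:
--         left_count[x] = left_count.get(x, 0) + 1
--     return sum(key * left_count.get(key, 0) * value
--                for key, value in compressed_list_right.items())
-- ===== Notes on version B (the rewrite author's own statement) =====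
-- stated objective: alternative
-- what changed: B aggregates list_left into a frequency table once and then sums key * left_count.get(key,0) * value over the items of the right table, instead of scanning list_left element by element with a membership test into the right table.
import Mathlib
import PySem

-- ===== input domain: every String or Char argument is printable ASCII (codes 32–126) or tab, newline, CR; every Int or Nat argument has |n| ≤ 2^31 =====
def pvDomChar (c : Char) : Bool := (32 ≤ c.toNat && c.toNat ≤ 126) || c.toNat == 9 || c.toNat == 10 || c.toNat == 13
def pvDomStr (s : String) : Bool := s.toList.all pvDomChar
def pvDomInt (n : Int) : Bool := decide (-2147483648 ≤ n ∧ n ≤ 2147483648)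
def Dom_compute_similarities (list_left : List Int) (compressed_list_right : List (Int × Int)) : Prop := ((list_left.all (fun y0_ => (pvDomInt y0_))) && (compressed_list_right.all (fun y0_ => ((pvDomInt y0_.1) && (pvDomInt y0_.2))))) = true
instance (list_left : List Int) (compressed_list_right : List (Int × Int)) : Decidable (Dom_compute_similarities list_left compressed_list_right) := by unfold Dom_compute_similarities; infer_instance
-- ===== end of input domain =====

-- B builds a frequency table of list_left once and sums key * count * value over the right table's items instead of scanning list_left with a membership test; return values proved equal.


-- ===== PORT A =====
def compute_similarities (list_left : List Int) (compressed_list_right : List (Int × Int)) : Int :=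
  let d := PySem.Dict.ofList compressed_list_right
  list_left.foldl
    (fun similarity x =>
      if d.contains x then similarity + x * d.getD x 0 else similarity) 0

-- ===== PORT B =====
def compute_similarities_alt (list_left : List Int) (compressed_list_right : List (Int × Int)) : Int :=
  let left_count := list_left.foldl (fun c x => c.insert x (c.getD x 0 + 1)) PySem.Dict.empty
  (((PySem.Dict.ofList compressed_list_right).items).map
    (fun p => p.1 * left_count.getD p.1 0 * p.2)).sum

-- ===== PRECONDITION & SPEC =====
def Spec_compute_similarities (list_left : List Int) (compressed_list_right : List (Int × Int)) (out : Int) : Prop := out = compute_similarities_alt list_left compressed_list_right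
instance (list_left : List Int) (compressed_list_right : List (Int × Int)) (out : Int) : Decidable (Spec_compute_similarities list_left compressed_list_right out) := by unfold Spec_compute_similarities; infer_instance

-- ===== CLAIM (what is proved, stated in full; the proofs are below) =====
def Claim_equal_compute_similarities : Prop := ∀ (list_left : List Int) (compressed_list_right : List (Int × Int)), Dom_compute_similarities list_left compressed_list_right → Spec_compute_similarities list_left compressed_list_right (compute_similarities list_left compressed_list_right)

-- ===== LEMMAS AND PROOFS =====

-- Over a Nodup list, the sum of 'g k where k = x, else 0' is g x if x ∈ s, else 0.
theorem pv_sum_single (g : Int → Int) (x : Int) :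
    ∀ (s : List Int), s.Nodup →
      (s.map (fun k => if k = x then g k else 0)).sum = if x ∈ s then g x else 0 := by
  intro s
  induction s with
  | nil => simp
  | cons a t ih =>
    intro hnd
    have ht := ih (List.nodup_cons.mp hnd).2
    by_cases hax : a = x
    · subst hax
      have hnx : a ∉ t := (List.nodup_cons.mp hnd).1
      simp [ht, hnx]
    · have : (x ∈ a :: t) ↔ (x ∈ t) := by
        constructor
        · intro h; rcases List.mem_cons.mp h with h | h
          · exact absurd h.symm hax
          · exact h
        · exact List.mem_cons_of_mem a
      by_cases hxt : x ∈ t <;> simp [ht, hax, hxt, this]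
    
-- A sum over a list equals the count-weighted sum over any Nodup list s,
-- provided g vanishes outside s.
theorem pv_count_sum (g : Int → Int) (s : List Int) (hnd : s.Nodup)
    (hz : ∀ x, x ∉ s → g x = 0) :
    ∀ (l : List Int), (l.map g).sum = (s.map (fun k => (l.count k : Int) * g k)).sum := by
  intro l
  induction l with
  | nil => simp
  | cons x t ih =>
    have hmap : (s.map (fun k => ((x :: t).count k : Int) * g k)).sum
        = (s.map (fun k => (t.count k : Int) * g k + (if k = x then g k else 0))).sum := by
      apply congrArg
      apply List.map_congr_left
      intro k _
      by_cases hkx : k = x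
      · subst hkx; simp; ring
      · have : (x == k) = false := by
          simpa using fun h => hkx h.symm
        simp [List.count_cons, this, hkx]
    have hsingle := pv_sum_single g x s hnd
    have hgx : (if x ∈ s then g x else 0) = g x := by
      by_cases hxs : x ∈ s
      · simp [hxs]
      · simp [hxs, hz x hxs]
    calc ((x :: t).map g).sum = g x + (t.map g).sum := by simp
      _ = (s.map (fun k => (t.count k : Int) * g k)).sum
            + (s.map (fun k => if k = x then g k else 0)).sum := by
            rw [ih, hsingle, hgx]; ring
      _ = (s.map (fun k => (t.count k : Int) * g k + (if k = x then g k else 0))).sum := by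
            rw [← List.sum_map_add]
      _ = (s.map (fun k => ((x :: t).count k : Int) * g k)).sum := hmap.symm

-- ===== VERDICT (by name: the statement is the Claim_ definition above) =====
theorem compute_similarities_spec : Claim_equal_compute_similarities := by
  intro l r _
  unfold Spec_compute_similarities compute_similarities compute_similarities_alt
  simp only []
  set d := PySem.Dict.ofList r with hd
  have hndk : d.keys.Nodup := hd ▸ PySem.Dict.nodup_keys_ofList r
  -- A's loop as a sum of a vanishing-outside-keys function
  have hA : l.foldl (fun s x => if d.contains x then s + x * d.getD x 0 else s) 0
      = (l.map (fun x => if d.contains x then x * d.getD x 0 else 0)).sum := by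
    rw [PySem.List.foldl_congr_mem l _
      (fun s x => s + (if d.contains x then x * d.getD x 0 else 0)) 0
      (by intro acc x _; by_cases h : d.contains x <;> simp [h])]
    rw [PySem.List.foldl_add]; simp
  -- the frequency table looks up to the multiplicity in l
  have hcnt : ∀ k : Int,
      (l.foldl (fun c x => c.insert x (c.getD x 0 + 1)) PySem.Dict.empty).getD k 0
        = (l.count k : Int) := by
    intro k
    rw [PySem.Dict.getD_foldl_insert_add_one]
    simp
  -- B's sum over items rewritten as a sum over keys
  have hB : (d.items.map (fun p => p.1 *
        (l.foldl (fun c x => c.insert x (c.getD x 0 + 1)) PySem.Dict.empty).getD p.1 0 * p.2)).sum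
      = (d.keys.map (fun k => (l.count k : Int) *
          (if d.contains k then k * d.getD k 0 else 0))).sum := by
    rw [PySem.Dict.items_eq_map_keys d hndk 0, List.map_map]
    apply congrArg
    apply List.map_congr_left
    intro k hk
    have hc : d.contains k = true := (PySem.Dict.contains_iff_mem_keys d k).mpr hk
    simp [Function.comp, hc, hcnt]; ring
  rw [hA, hB]
  exact pv_count_sum _ d.keys hndk
    (by intro x hx
        have hc : d.contains x = false := by
          by_contra h
          exact hx ((PySem.Dict.contains_iff_mem_keys d x).mp (by simpa using h))
        simp [hc]) l
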